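-- pv_equiv track=rewrite | github.com/lizhihang1017/DECOR | data/step6_2_negative_samples.py | get_balanced_negatives
-- ===== SOURCE A (Python) =====
-- def get_balanced_negatives(order, positives, segments, min_distance=1):
--
--     # 1. 创建排除集合（正样本及其相邻）
--     n = len(segments)
--     exclude_set = set()
--
--     # 添加所有正样本
--     exclude_set.update(positives)
--
--     # 添加正样本的相邻
--     for pos in positives:
--         # 左侧相邻
--         for i in range(1, min_distance + 1):
--             if pos - i >= 0:
--                 exclude_set.add(pos - i)
--         # 右侧相邻
--         for i in range(1, min_distance + 1):
--             if pos + i < n: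
--                 exclude_set.add(pos + i)
--
--     # 2. 确定候选池（相似度最低的50%）
--     mid_point = max(1, len(order) // 2)  # 确保至少1个候选
--     candidate_pool = []
--
--     # 遍历排序列表（从相似度最低开始）
--     for idx in order:
--         # 检查是否达到中点
--         if len(candidate_pool) >= mid_point:
--             break
--
--         # 检查是否在排除集中
--         if idx not in exclude_set:
--             candidate_pool.append(idx)
--
--     # 3. 最终过滤：确保最小距离
--     final_candidates = []
--     for cand in candidate_pool:
--         # 计算与所有正样本的最小距离
--         min_dist = min(abs(cand - pos) for pos in positives)
--
--         # 满足最小距离要求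
--         if min_dist > min_distance:
--             final_candidates.append(cand)
--
--     return final_candidates  # 返回的是命题列表中的索引
-- ===== SOURCE B (Python) =====
-- def _lower_bound(xs, x):
--     # index of the first element of sorted xs that is >= x
--     lo, hi = 0, len(xs)
--     while lo < hi:
--         mid = (lo + hi) // 2
--         if xs[mid] < x:
--             lo = mid + 1
--         else:
--             hi = mid
--     return lo
--
--
-- def _min_dist(ps, x):
--     # distance from x to the nearest element of the sorted non-empty list ps:
--     # only the two neighbours of the insertion point can be nearest
--     i = _lower_bound(ps, x)
--     if i == len(ps):
--         return x - ps[-1]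
--     if i == 0:
--         return ps[0] - x
--     return min(ps[i] - x, x - ps[i - 1])
--
--
-- def _in_intervals(iv, x):
--     # membership in a sorted list of disjoint closed intervals, by binary search
--     lo, hi = 0, len(iv)
--     while lo < hi:
--         mid = (lo + hi) // 2
--         if iv[mid][0] <= x:
--             lo = mid + 1
--         else:
--             hi = mid
--     return lo > 0 and x <= iv[lo - 1][1]
--
--
-- def get_balanced_negatives(order, positives, segments, min_distance=1):
--     n = len(segments)
--     ps = sorted(positives)
--
--     # Blocked positions as merged sorted intervals: every positive blocks itself
--     # plus its neighbours within min_distance that lie inside the segment range.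
--     blocked = []
--     for p in ps:
--         lo = min(p, max(p - min_distance, 0))
--         hi = max(p, min(p + min_distance, n - 1))
--         if blocked and lo <= blocked[-1][1] + 1:
--             if hi > blocked[-1][1]:
--                 blocked[-1] = (blocked[-1][0], hi)
--         else:
--             blocked.append((lo, hi))
--
--     # One pass over order: the first mid_point unblocked indices are the
--     # candidate pool; keep those farther than min_distance from every positive.
--     mid_point = max(1, len(order) // 2)
--     result = []
--     taken = 0
--     for idx in order:
--         if taken >= mid_point:
--             break
--         if _in_intervals(blocked, idx):
--             continue
--         taken += 1
--         if _min_dist(ps, idx) > min_distance: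
--             result.append(idx)
--     return result
-- ===== Notes on version B (the rewrite author's own statement) =====
-- stated objective: faster
-- what changed: B sorts the positives once, represents the blocked positions as merged sorted intervals (each positive clamped to the segment range) and answers both the blocked test and the nearest-positive distance by binary search in a single pass over order, replacing A's enumerated exclude set and its per-candidate linear min over all positives.
import Mathlib
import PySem

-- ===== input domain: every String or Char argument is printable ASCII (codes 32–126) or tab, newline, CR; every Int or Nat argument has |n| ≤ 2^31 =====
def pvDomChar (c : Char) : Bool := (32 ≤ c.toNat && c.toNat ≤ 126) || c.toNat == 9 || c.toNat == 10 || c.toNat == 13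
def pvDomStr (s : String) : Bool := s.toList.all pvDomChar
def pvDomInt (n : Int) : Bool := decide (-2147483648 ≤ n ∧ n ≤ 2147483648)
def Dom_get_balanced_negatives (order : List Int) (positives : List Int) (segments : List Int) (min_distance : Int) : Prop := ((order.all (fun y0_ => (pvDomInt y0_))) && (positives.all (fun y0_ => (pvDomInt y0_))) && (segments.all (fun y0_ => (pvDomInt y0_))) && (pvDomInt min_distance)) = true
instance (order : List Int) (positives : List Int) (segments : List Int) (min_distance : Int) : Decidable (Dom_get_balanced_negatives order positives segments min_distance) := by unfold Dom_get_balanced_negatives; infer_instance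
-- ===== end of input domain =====

-- B sorts the positives once, stores the blocked positions as merged sorted intervals and
-- answers the blocked test and the nearest-positive distance by binary search in one pass
-- over `order`, replacing A's enumerated exclude set and per-candidate linear minimum.

-- ===== PORT A =====
def get_balanced_negatives (order : List Int) (positives : List Int) (segments : List Int) (min_distance : Int) : List Int :=
  let n : Int := (segments.length : Int)
  let exclude_set : PySem.Set Int := PySem.Set.update PySem.Set.empty positives
  let exclude_set : PySem.Set Int := positives.foldl (fun s pos =>
    let s := (PySem.List.pyRange 1 (min_distance + 1) 1).foldl
      (fun s i => if 0 ≤ pos - i then PySem.Set.add s (pos - i) else s) s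
    (PySem.List.pyRange 1 (min_distance + 1) 1).foldl
      (fun s i => if pos + i < n then PySem.Set.add s (pos + i) else s) s) exclude_set
  let mid_point : Int := max 1 (PySem.Int.floordiv (order.length : Int) 2)
  let candidate_pool : List Int := order.foldl (fun pool idx =>
    if mid_point ≤ (pool.length : Int) then pool
    else if PySem.Set.contains exclude_set idx then pool
    else pool ++ [idx]) []
  candidate_pool.foldl (fun fc cand =>
    match PySem.List.min? (positives.map (fun pos => |cand - pos|)) (fun x => x) with
    | some m => if min_distance < m then fc ++ [cand] else fc
    | none => fc) []   -- `min` over an empty `positives` raises in Python: outside Pre_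

-- ===== PORT B =====
-- Source B's _lower_bound: its while-loop as structural recursion on the fuel hi - lo
-- (each iteration shrinks hi - lo, so hi - lo steps always suffice)
def pvLBGo (xs : List Int) (x : Int) : Nat → Nat → Nat → Nat
  | 0, lo, _ => lo
  | fuel + 1, lo, hi =>
    if lo < hi then
      let mid := (lo + hi) / 2
      if (PySem.List.pyGet? xs (mid : Int)).getD 0 < x then pvLBGo xs x fuel (mid + 1) hi
      else pvLBGo xs x fuel lo mid
    else lo

def pvLB (xs : List Int) (x : Int) (lo hi : Nat) : Nat := pvLBGo xs x (hi - lo) lo hi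

-- Source B's _min_dist: distance from x to the nearest element of the sorted ps
def pvMinDist (ps : List Int) (x : Int) : Int :=
  let i := pvLB ps x 0 ps.length
  if i = ps.length then x - (PySem.List.pyGet? ps (-1)).getD 0
  else if i = 0 then (PySem.List.pyGet? ps ((i : Int))).getD 0 - x
  else min ((PySem.List.pyGet? ps ((i : Int))).getD 0 - x) (x - (PySem.List.pyGet? ps ((i : Int) - 1)).getD 0)

-- Source B's _in_intervals while-loop, same fuel scheme: count of intervals with left end ≤ x
def pvLBivGo (iv : List (Int × Int)) (x : Int) : Nat → Nat → Nat → Nat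
  | 0, lo, _ => lo
  | fuel + 1, lo, hi =>
    if lo < hi then
      let mid := (lo + hi) / 2
      if ((PySem.List.pyGet? iv (mid : Int)).getD (0, 0)).1 ≤ x then pvLBivGo iv x fuel (mid + 1) hi
      else pvLBivGo iv x fuel lo mid
    else lo

def pvLBiv (iv : List (Int × Int)) (x : Int) (lo hi : Nat) : Nat := pvLBivGo iv x (hi - lo) lo hi

-- Source B's _in_intervals: membership in a sorted list of disjoint closed intervals
def pvInIntervals (iv : List (Int × Int)) (x : Int) : Bool :=
  let l := pvLBiv iv x 0 iv.length
  decide (0 < l) && decide (x ≤ ((PySem.List.pyGet? iv ((l : Int) - 1)).getD (0, 0)).2)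

-- the interval ends Source B computes for a positive p (clamped to the segment range)
def pvLc (md p : Int) : Int := min p (max (p - md) 0)
def pvHc (n md p : Int) : Int := max p (min (p + md) (n - 1))

-- one step of Source B's interval-building loop (blocked[-1] access / in-place update)
def pvAddInterval (n md : Int) (acc : List (Int × Int)) (p : Int) : List (Int × Int) :=
  let lo := pvLc md p
  let hi := pvHc n md p
  match acc.getLast? with
  | some lh =>
      if lo ≤ lh.2 + 1 then
        (if lh.2 < hi then acc.dropLast ++ [(lh.1, hi)] else acc)
      else acc ++ [(lo, hi)]
  | none => acc ++ [(lo, hi)]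

def get_balanced_negatives_alt (order : List Int) (positives : List Int) (segments : List Int) (min_distance : Int) : List Int :=
  let n : Int := (segments.length : Int)
  let ps : List Int := PySem.List.sorted positives (fun x => x) false
  let blocked : List (Int × Int) := ps.foldl (pvAddInterval n min_distance) []
  let mid_point : Int := max 1 (PySem.Int.floordiv (order.length : Int) 2)
  (order.foldl (fun (st : Int × List Int) idx =>
    if mid_point ≤ st.1 then st
    else if pvInIntervals blocked idx then st
    else (st.1 + 1, if min_distance < pvMinDist ps idx then st.2 ++ [idx] else st.2))
    ((0 : Int), ([] : List Int))).2
    -- Source B's `_min_dist` indexes `ps[-1]`, which raises on empty `positives`: outside Pre_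

-- ===== PRECONDITION & SPEC =====
-- Pre_ excludes exactly the inputs where Python A raises (ValueError from `min` over an
-- empty sequence: positives empty while the candidate pool is nonempty, i.e. order ≠ []).
def Pre_get_balanced_negatives (order : List Int) (positives : List Int) (segments : List Int) (min_distance : Int) : Prop :=
  positives ≠ [] ∨ order = []
instance (order : List Int) (positives : List Int) (segments : List Int) (min_distance : Int) : Decidable (Pre_get_balanced_negatives order positives segments min_distance) := by unfold Pre_get_balanced_negatives; infer_instance
def pvWitness_get_balanced_negatives : List Int × List Int × List Int × Int := ([0, 3, 5], [1], [0, 0, 0, 0, 0, 0], 1)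
def Spec_get_balanced_negatives (order : List Int) (positives : List Int) (segments : List Int) (min_distance : Int) (out : List Int) : Prop := out = get_balanced_negatives_alt order positives segments min_distance
instance (order : List Int) (positives : List Int) (segments : List Int) (min_distance : Int) (out : List Int) : Decidable (Spec_get_balanced_negatives order positives segments min_distance out) := by unfold Spec_get_balanced_negatives; infer_instance

-- ===== CLAIM (what is proved, stated in full; the proofs are below) =====
def Claim_equal_get_balanced_negatives : Prop := ∀ (order : List Int) (positives : List Int) (segments : List Int) (min_distance : Int), Dom_get_balanced_negatives order positives segments min_distance → Pre_get_balanced_negatives order positives segments min_distance → Spec_get_balanced_negatives order positives segments min_distance (get_balanced_negatives order positives segments min_distance)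

-- ===== LEMMAS AND PROOFS =====
lemma getD_mono_of_sorted (xs : List Int) (hs : xs.Pairwise (· ≤ ·)) :
    ∀ i j, i ≤ j → j < xs.length → xs.getD i 0 ≤ xs.getD j 0 := by
  intro i j hij hj
  rcases eq_or_lt_of_le hij with rfl | hlt
  · exact le_refl _
  · have := (List.pairwise_iff_getElem.mp hs) i j (by omega) hj hlt
    simpa [List.getD_eq_getElem?_getD, List.getElem?_eq_getElem, (by omega : i < xs.length), hj] using this

lemma getD_mem (xs : List Int) (j : Nat) (hj : j < xs.length) : xs.getD j 0 ∈ xs := by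
  rw [List.getD_eq_getElem?_getD, List.getElem?_eq_getElem hj]
  exact List.getElem_mem hj

lemma getDp_mem (xs : List (Int × Int)) (j : Nat) (hj : j < xs.length) : xs.getD j (0,0) ∈ xs := by
  rw [List.getD_eq_getElem?_getD, List.getElem?_eq_getElem hj]
  exact List.getElem_mem hj

lemma pvLBGo_spec (xs : List Int) (x : Int)
    (hmono : ∀ i j, i ≤ j → j < xs.length → xs.getD i 0 ≤ xs.getD j 0) :
    ∀ k lo hi, hi - lo ≤ k → lo ≤ hi → hi ≤ xs.length →
      (∀ j, j < lo → xs.getD j 0 < x) →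
      (∀ j, hi ≤ j → j < xs.length → x ≤ xs.getD j 0) →
      lo ≤ pvLBGo xs x k lo hi ∧ pvLBGo xs x k lo hi ≤ hi ∧
      (∀ j, j < pvLBGo xs x k lo hi → xs.getD j 0 < x) ∧
      (∀ j, pvLBGo xs x k lo hi ≤ j → j < xs.length → x ≤ xs.getD j 0) := by
  intro k
  induction k with
  | zero =>
    intro lo hi hk hle hlen h1 h2
    rw [pvLBGo]
    exact ⟨le_refl _, hle, h1, fun j hj hjl => h2 j (by omega) hjl⟩
  | succ k ih =>
    intro lo hi hk hle hlen h1 h2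
    by_cases hlt : lo < hi
    · rw [pvLBGo, if_pos hlt]
      have hbr : (PySem.List.pyGet? xs (((lo + hi) / 2 : Nat) : Int)).getD 0 = xs.getD ((lo + hi) / 2) 0 := by
        simp only [PySem.List.pyGet?_natCast, List.getD_eq_getElem?_getD]
      by_cases hc : (PySem.List.pyGet? xs (((lo + hi) / 2 : Nat) : Int)).getD 0 < x
      · rw [if_pos hc]
        rw [hbr] at hc
        obtain ⟨a1, a2, a3, a4⟩ := ih ((lo + hi) / 2 + 1) hi (by omega) (by omega) hlen
          (fun j hj => by
            have hm : xs.getD j 0 ≤ xs.getD ((lo + hi) / 2) 0 := hmono j _ (by omega) (by omega)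
            omega) h2
        exact ⟨by omega, a2, a3, a4⟩
      · rw [if_neg hc]
        rw [hbr] at hc
        obtain ⟨a1, a2, a3, a4⟩ := ih lo ((lo + hi) / 2) (by omega) (by omega) (by omega) h1
          (fun j hj hjl => by
            have hm : xs.getD ((lo + hi) / 2) 0 ≤ xs.getD j 0 := hmono _ j (by omega) hjl
            omega)
        exact ⟨a1, by omega, a3, a4⟩
    · rw [pvLBGo, if_neg hlt]
      exact ⟨le_refl _, hle, h1, fun j hj hjl => h2 j (by omega) hjl⟩

lemma pvLB_spec (xs : List Int) (x : Int)
    (hmono : ∀ i j, i ≤ j → j < xs.length → xs.getD i 0 ≤ xs.getD j 0)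
    (lo hi : Nat) (hle : lo ≤ hi) (hlen : hi ≤ xs.length)
    (h1 : ∀ j, j < lo → xs.getD j 0 < x)
    (h2 : ∀ j, hi ≤ j → j < xs.length → x ≤ xs.getD j 0) :
    lo ≤ pvLB xs x lo hi ∧ pvLB xs x lo hi ≤ hi ∧
    (∀ j, j < pvLB xs x lo hi → xs.getD j 0 < x) ∧
    (∀ j, pvLB xs x lo hi ≤ j → j < xs.length → x ≤ xs.getD j 0) :=
  pvLBGo_spec xs x hmono (hi - lo) lo hi (le_refl _) hle hlen h1 h2

lemma pvMinDist_spec (ps : List Int) (x : Int) (hs : ps.Pairwise (· ≤ ·)) (hne : ps ≠ []) :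
    (∃ p ∈ ps, pvMinDist ps x = |x - p|) ∧ (∀ p ∈ ps, pvMinDist ps x ≤ |x - p|) := by
  have hmono := getD_mono_of_sorted ps hs
  have hlen : 0 < ps.length := List.length_pos_iff.mpr hne
  obtain ⟨a1, a2, a3, a4⟩ := pvLB_spec ps x hmono 0 ps.length (by omega)
    (le_refl _) (fun j hj => by omega) (fun j hj hjl => by omega)
  set i := pvLB ps x 0 ps.length with hi
  -- index-membership helper: for p ∈ ps, p = ps.getD j 0 for some j < len
  have hidx : ∀ p ∈ ps, ∃ j, j < ps.length ∧ p = ps.getD j 0 := by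
    intro p hp
    obtain ⟨j, hj, hg⟩ := List.mem_iff_getElem.mp hp
    exact ⟨j, hj, by rw [List.getD_eq_getElem?_getD, List.getElem?_eq_getElem hj, Option.getD_some, hg]⟩
  have hlast : (PySem.List.pyGet? ps (-1)).getD 0 = ps.getD (ps.length - 1) 0 := by
    rw [PySem.List.pyGet?_neg_one]
    rcases List.eq_nil_or_concat ps with rfl | ⟨ys, a, rfl⟩
    · simp at hne
    · simp [List.getLast?_concat, List.getD_eq_getElem?_getD]
  have hcast : ∀ (j : Nat), (PySem.List.pyGet? ps ((j : Int))).getD 0 = ps.getD j 0 := by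
    intro j; simp only [PySem.List.pyGet?_natCast, List.getD_eq_getElem?_getD]
  unfold pvMinDist
  rw [← hi]
  by_cases hE : i = ps.length
  · -- every element < x; nearest is the last
    rw [if_pos hE, hlast]
    constructor
    · refine ⟨ps.getD (ps.length - 1) 0, getD_mem ps _ (by omega), ?_⟩
      have := a3 (ps.length - 1) (by omega)
      rw [abs_of_pos (by omega)]
    · intro p hp
      obtain ⟨j, hj, rfl⟩ := hidx p hp
      have h1 := a3 j (by omega)
      have h2 := hmono j (ps.length - 1) (by omega) (by omega)
      rw [abs_of_pos (by omega)]; omega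
  · rw [if_neg hE]
    have hilen : i < ps.length := by omega
    by_cases h0 : i = 0
    · -- x ≤ every element; nearest is the first
      rw [if_pos h0, h0]
      have hx0 := a4 0 (by omega) (by omega)
      constructor
      · refine ⟨ps.getD 0 0, getD_mem ps _ (by omega), ?_⟩
        rw [hcast 0, abs_of_nonpos (by omega)]; ring
      · intro p hp
        obtain ⟨j, hj, rfl⟩ := hidx p hp
        have h1 := a4 j (by omega) hj
        have h2 := hmono 0 j (by omega) hj
        rw [hcast 0, abs_of_nonpos (by omega)]; omega
    · rw [if_neg h0]
      have hformula : ((i : Int)) - 1 = ((i - 1 : Nat) : Int) := by omega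
      rw [hformula, hcast i, hcast (i - 1)]
      have hri := a4 i (le_refl _) hilen
      have hli := a3 (i - 1) (by omega)
      constructor
      · rcases le_total (ps.getD i 0 - x) (x - ps.getD (i-1) 0) with hle | hle
        · refine ⟨ps.getD i 0, getD_mem ps _ hilen, ?_⟩
          rw [min_eq_left hle, abs_of_nonpos (by omega)]; ring
        · refine ⟨ps.getD (i-1) 0, getD_mem ps _ (by omega), ?_⟩
          rw [min_eq_right hle, abs_of_pos (by omega)]
      · intro p hp
        obtain ⟨j, hj, rfl⟩ := hidx p hp
        by_cases hji : j < i
        · have h2 := hmono j (i-1) (by omega) (by omega)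
          have h1 := a3 j (by omega)
          rw [abs_of_pos (by omega)]
          have := min_le_right (ps.getD i 0 - x) (x - ps.getD (i-1) 0)
          omega
        · have h2 := hmono i j (by omega) hj
          have h1 := a4 j (by omega) hj
          rw [abs_of_nonpos (by omega)]
          have := min_le_left (ps.getD i 0 - x) (x - ps.getD (i-1) 0)
          omega

lemma pvLBivGo_spec (iv : List (Int × Int)) (x : Int)
    (hmono : ∀ i j, i ≤ j → j < iv.length → (iv.getD i (0,0)).1 ≤ (iv.getD j (0,0)).1) :
    ∀ k lo hi, hi - lo ≤ k → lo ≤ hi → hi ≤ iv.length →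
      (∀ j, j < lo → (iv.getD j (0,0)).1 ≤ x) →
      (∀ j, hi ≤ j → j < iv.length → x < (iv.getD j (0,0)).1) →
      lo ≤ pvLBivGo iv x k lo hi ∧ pvLBivGo iv x k lo hi ≤ hi ∧
      (∀ j, j < pvLBivGo iv x k lo hi → (iv.getD j (0,0)).1 ≤ x) ∧
      (∀ j, pvLBivGo iv x k lo hi ≤ j → j < iv.length → x < (iv.getD j (0,0)).1) := by
  intro k
  induction k with
  | zero =>
    intro lo hi hk hle hlen h1 h2
    rw [pvLBivGo]
    exact ⟨le_refl _, hle, h1, fun j hj hjl => h2 j (by omega) hjl⟩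
  | succ k ih =>
    intro lo hi hk hle hlen h1 h2
    by_cases hlt : lo < hi
    · rw [pvLBivGo, if_pos hlt]
      have hbr : (PySem.List.pyGet? iv (((lo + hi) / 2 : Nat) : Int)).getD (0,0) = iv.getD ((lo + hi) / 2) (0,0) := by
        simp only [PySem.List.pyGet?_natCast, List.getD_eq_getElem?_getD]
      by_cases hc : ((PySem.List.pyGet? iv (((lo + hi) / 2 : Nat) : Int)).getD (0,0)).1 ≤ x
      · rw [if_pos hc]
        rw [hbr] at hc
        obtain ⟨a1, a2, a3, a4⟩ := ih ((lo + hi) / 2 + 1) hi (by omega) (by omega) hlen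
          (fun j hj => by
            have hm := hmono j ((lo + hi) / 2) (by omega) (by omega)
            omega) h2
        exact ⟨by omega, a2, a3, a4⟩
      · rw [if_neg hc]
        rw [hbr] at hc
        obtain ⟨a1, a2, a3, a4⟩ := ih lo ((lo + hi) / 2) (by omega) (by omega) (by omega) h1
          (fun j hj hjl => by
            have hm := hmono ((lo + hi) / 2) j (by omega) hjl
            omega)
        exact ⟨a1, by omega, a3, a4⟩
    · rw [pvLBivGo, if_neg hlt]
      exact ⟨le_refl _, hle, h1, fun j hj hjl => h2 j (by omega) hjl⟩

lemma pvLBiv_spec (iv : List (Int × Int)) (x : Int)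
    (hmono : ∀ i j, i ≤ j → j < iv.length → (iv.getD i (0,0)).1 ≤ (iv.getD j (0,0)).1)
    (lo hi : Nat) (hle : lo ≤ hi) (hlen : hi ≤ iv.length)
    (h1 : ∀ j, j < lo → (iv.getD j (0,0)).1 ≤ x)
    (h2 : ∀ j, hi ≤ j → j < iv.length → x < (iv.getD j (0,0)).1) :
    lo ≤ pvLBiv iv x lo hi ∧ pvLBiv iv x lo hi ≤ hi ∧
    (∀ j, j < pvLBiv iv x lo hi → (iv.getD j (0,0)).1 ≤ x) ∧
    (∀ j, pvLBiv iv x lo hi ≤ j → j < iv.length → x < (iv.getD j (0,0)).1) :=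
  pvLBivGo_spec iv x hmono (hi - lo) lo hi (le_refl _) hle hlen h1 h2

-- separation invariant of the merged interval list
def IvSep (iv : List (Int × Int)) : Prop :=
  (∀ q ∈ iv, q.1 ≤ q.2) ∧ iv.Pairwise (fun a b => a.2 + 1 < b.1)

lemma pvInIntervals_spec (iv : List (Int × Int)) (x : Int) (hsep : IvSep iv) :
    pvInIntervals iv x = true ↔ ∃ q ∈ iv, q.1 ≤ x ∧ x ≤ q.2 := by
  obtain ⟨hlh, hpw⟩ := hsep
  have hpg := List.pairwise_iff_getElem.mp hpw
  have hg : ∀ i j, i < j → j < iv.length → (iv.getD i (0,0)).2 + 1 < (iv.getD j (0,0)).1 := by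
    intro i j hij hj
    have := hpg i j (by omega) hj hij
    simpa [List.getD_eq_getElem?_getD, List.getElem?_eq_getElem, (by omega : i < iv.length), hj] using this
  have hmono : ∀ i j, i ≤ j → j < iv.length → (iv.getD i (0,0)).1 ≤ (iv.getD j (0,0)).1 := by
    intro i j hij hj
    rcases eq_or_lt_of_le hij with rfl | hlt
    · exact le_refl _
    · have h1 := hg i j hlt hj
      have h2 := hlh _ (getDp_mem iv i (by omega))
      omega
  obtain ⟨a1, a2, a3, a4⟩ := pvLBiv_spec iv x hmono 0 iv.length (by omega)
    (le_refl _) (fun j hj => by omega) (fun j hj hjl => by omega)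
  set r := pvLBiv iv x 0 iv.length with hr
  have hidx : ∀ q ∈ iv, ∃ j, j < iv.length ∧ q = iv.getD j (0,0) := by
    intro q hq
    obtain ⟨j, hj, hgj⟩ := List.mem_iff_getElem.mp hq
    exact ⟨j, hj, by rw [List.getD_eq_getElem?_getD, List.getElem?_eq_getElem hj, Option.getD_some, hgj]⟩
  have hcast : ((PySem.List.pyGet? iv ((r : Int) - 1)).getD (0,0)) = iv.getD (r - 1) (0,0) ∨ r = 0 := by
    rcases Nat.eq_zero_or_pos r with h0 | h0
    · exact Or.inr h0
    · left
      have : ((r : Int) - 1) = ((r - 1 : Nat) : Int) := by omega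
      rw [this]
      simp only [PySem.List.pyGet?_natCast, List.getD_eq_getElem?_getD]
  unfold pvInIntervals
  rw [← hr]
  constructor
  · intro h
    simp only [Bool.and_eq_true, decide_eq_true_eq] at h
    obtain ⟨h0, hx2⟩ := h
    rcases hcast with hc | hc
    · rw [hc] at hx2
      exact ⟨iv.getD (r-1) (0,0), getDp_mem iv _ (by omega), a3 (r-1) (by omega), hx2⟩
    · omega
  · rintro ⟨q, hq, hq1, hq2⟩
    obtain ⟨j, hj, rfl⟩ := hidx q hq
    have hjr : j < r := by
      by_contra hc
      have := a4 j (by omega) hj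
      omega
    have h0 : 0 < r := by omega
    have hjeq : j = r - 1 := by
      by_contra hne
      have hlt : j < r - 1 := by omega
      have := hg j (r-1) hlt (by omega)
      have h1r := a3 (r-1) (by omega)
      omega
    simp only [Bool.and_eq_true, decide_eq_true_eq]
    rcases hcast with hc | hc
    · rw [hc]
      exact ⟨h0, by rw [← hjeq]; exact hq2⟩
    · omega

lemma pvLc_mono (md p q : Int) (h : p ≤ q) : pvLc md p ≤ pvLc md q := by unfold pvLc; omega
lemma pvLc_le_pvHc (n md p : Int) : pvLc md p ≤ pvHc n md p := by unfold pvLc pvHc; omega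

set_option maxHeartbeats 1000000 in
lemma blocked_fold (n md : Int) : ∀ (ps : List Int), ps.Pairwise (· ≤ ·) →
    ∀ acc, IvSep acc →
    (∀ q ∈ acc, ∀ q' ∈ acc.getLast?, q.2 ≤ q'.2) →
    (∀ q ∈ acc, ∀ p ∈ ps, q.1 ≤ pvLc md p) →
    IvSep (ps.foldl (pvAddInterval n md) acc) ∧
    (∀ y, (∃ q ∈ ps.foldl (pvAddInterval n md) acc, q.1 ≤ y ∧ y ≤ q.2) ↔
      (∃ q ∈ acc, q.1 ≤ y ∧ y ≤ q.2) ∨ ∃ p ∈ ps, pvLc md p ≤ y ∧ y ≤ pvHc n md p) := by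
  intro ps
  induction ps with
  | nil => intro _ acc hsep _ _; exact ⟨hsep, fun y => by simp⟩
  | cons p rest ih =>
    intro hpw acc hsep hlastmax hlo
    have hple : ∀ p' ∈ rest, p ≤ p' := fun p' hp' => (List.pairwise_cons.mp hpw).1 p' hp'
    have hrest : rest.Pairwise (· ≤ ·) := (List.pairwise_cons.mp hpw).2
    simp only [List.foldl_cons]
    -- analyse the step
    have step : ∃ acc', pvAddInterval n md acc p = acc' ∧ IvSep acc' ∧
        (∀ q ∈ acc', ∀ q' ∈ acc'.getLast?, q.2 ≤ q'.2) ∧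
        (∀ q ∈ acc', ∀ p' ∈ rest, q.1 ≤ pvLc md p') ∧
        (∀ y, (∃ q ∈ acc', q.1 ≤ y ∧ y ≤ q.2) ↔
          (∃ q ∈ acc, q.1 ≤ y ∧ y ≤ q.2) ∨ (pvLc md p ≤ y ∧ y ≤ pvHc n md p)) := by
      rcases List.eq_nil_or_concat acc with rfl | ⟨front, b0, hacc⟩
      · refine ⟨[(pvLc md p, pvHc n md p)], by simp [pvAddInterval], ?_, ?_, ?_, ?_⟩
        · exact ⟨by simp [pvLc_le_pvHc], by simp⟩
        · simp
        · intro q hq p' hp'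
          simp only [List.mem_singleton] at hq
          subst hq
          exact pvLc_mono md p p' (hple p' hp')
        · intro y; simp
      · -- acc = front ++ [b0]
        rw [List.concat_eq_append] at hacc
        subst hacc
        obtain ⟨hlh, hpws⟩ := hsep
        obtain ⟨hpf, -, hfb0⟩ := List.pairwise_append.mp hpws
        have hfb0' : ∀ a ∈ front, a.2 + 1 < b0.1 := by
          intro a ha; exact hfb0 a ha b0 (List.mem_singleton.mpr rfl)
        have hb0lh : b0.1 ≤ b0.2 := hlh b0 (by simp)
        have hmax : ∀ q ∈ front, q.2 ≤ b0.2 := by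
          intro q hq
          exact hlastmax q (by simp [hq]) b0 (by simp [List.getLast?_concat])
        have hb0lo : b0.1 ≤ pvLc md p := hlo b0 (by simp) p (by simp)
        rw [pvAddInterval]
        simp only [List.getLast?_concat, List.dropLast_concat]
        by_cases hmerge : pvLc md p ≤ b0.2 + 1
        · rw [if_pos hmerge]
          by_cases hgrow : b0.2 < pvHc n md p
          · rw [if_pos hgrow]
            refine ⟨front ++ [(b0.1, pvHc n md p)], rfl, ⟨?_, ?_⟩, ?_, ?_, ?_⟩
            · intro q hq
              rcases List.mem_append.mp hq with h | h
              · exact hlh q (by simp [h])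
              · simp only [List.mem_singleton] at h; subst h; simp only
                omega
            · rw [List.pairwise_append]
              exact ⟨hpf, List.pairwise_singleton _ _, by
                intro a ha b hb
                simp only [List.mem_singleton] at hb; subst hb
                exact hfb0' a ha⟩
            · intro q hq q' hq'
              simp only [List.getLast?_concat, Option.mem_def, Option.some.injEq] at hq'
              subst hq'
              rcases List.mem_append.mp hq with h | h
              · have := hmax q h; simp only; omega
              · simp only [List.mem_singleton] at h; subst h; simp
            · intro q hq p' hp'
              have hppc : pvLc md p ≤ pvLc md p' := pvLc_mono md p p' (hple p' hp')
              rcases List.mem_append.mp hq with h | h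
              · have := hlo q (by simp [h]) p (by simp); omega
              · simp only [List.mem_singleton] at h; subst h; simp only; omega
            · intro y
              constructor
              · rintro ⟨q, hq, hy1, hy2⟩
                rcases List.mem_append.mp hq with h | h
                · exact Or.inl ⟨q, by simp [h], hy1, hy2⟩
                · simp only [List.mem_singleton] at h; subst h
                  simp only at hy1 hy2
                  by_cases hyq : y ≤ b0.2
                  · exact Or.inl ⟨b0, by simp, hy1, hyq⟩
                  · exact Or.inr ⟨by omega, hy2⟩
              · rintro (⟨q, hq, hy1, hy2⟩ | ⟨hy1, hy2⟩)
                · rcases List.mem_append.mp hq with h | h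
                  · exact ⟨q, by simp [h], hy1, hy2⟩
                  · simp only [List.mem_singleton] at h
                    have h1 : b0.1 ≤ y := by rw [h] at hy1; exact hy1
                    have h2 : y ≤ b0.2 := by rw [h] at hy2; exact hy2
                    exact ⟨(b0.1, pvHc n md p), by simp, h1, by simp only; omega⟩
                · exact ⟨(b0.1, pvHc n md p), by simp, by simp only; omega, by simp only; omega⟩
          · rw [if_neg hgrow]
            refine ⟨front ++ [b0], rfl, ⟨hlh, hpws⟩, hlastmax, ?_, ?_⟩
            · intro q hq p' hp'
              have hppc : pvLc md p ≤ pvLc md p' := pvLc_mono md p p' (hple p' hp')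
              have := hlo q hq p (by simp); omega
            · intro y
              constructor
              · rintro ⟨q, hq, hy⟩; exact Or.inl ⟨q, hq, hy⟩
              · rintro (⟨q, hq, hy⟩ | ⟨hy1, hy2⟩)
                · exact ⟨q, hq, hy⟩
                · exact ⟨b0, by simp, by omega, by omega⟩
        · rw [if_neg hmerge]
          refine ⟨(front ++ [b0]) ++ [(pvLc md p, pvHc n md p)], rfl, ⟨?_, ?_⟩, ?_, ?_, ?_⟩
          · intro q hq
            rcases List.mem_append.mp hq with h | h
            · exact hlh q h
            · simp only [List.mem_singleton] at h; subst h
              exact pvLc_le_pvHc n md p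
          · rw [List.pairwise_append]
            refine ⟨hpws, List.pairwise_singleton _ _, ?_⟩
            intro a ha b hb
            simp only [List.mem_singleton] at hb; subst hb
            rcases List.mem_append.mp ha with h | h
            · have h1 := hmax a h; simp only; omega
            · simp only [List.mem_singleton] at h; subst h; simp only; omega
          · intro q hq q' hq'
            simp only [List.getLast?_concat, Option.mem_def, Option.some.injEq] at hq'
            subst hq'
            have hhc : b0.2 < pvHc n md p := by
              have := pvLc_le_pvHc n md p
              unfold pvLc pvHc at *; omega
            rcases List.mem_append.mp hq with h | h
            · rcases List.mem_append.mp h with h' | h'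
              · have := hmax q h'; simp only; omega
              · simp only [List.mem_singleton] at h'; subst h'; simp only; omega
            · simp only [List.mem_singleton] at h; subst h; simp
          · intro q hq p' hp'
            have hppc : pvLc md p ≤ pvLc md p' := pvLc_mono md p p' (hple p' hp')
            rcases List.mem_append.mp hq with h | h
            · have := hlo q h p (by simp); omega
            · simp only [List.mem_singleton] at h; subst h; simp only; omega
          · intro y
            constructor
            · rintro ⟨q, hq, hy⟩
              rcases List.mem_append.mp hq with h | h
              · exact Or.inl ⟨q, h, hy⟩
              · simp only [List.mem_singleton] at h; subst h
                exact Or.inr hy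
            · rintro (⟨q, hq, hy⟩ | hy)
              · exact ⟨q, List.mem_append.mpr (Or.inl hq), hy⟩
              · exact ⟨(pvLc md p, pvHc n md p), by simp, hy⟩
    obtain ⟨acc', heq, hs1, hs2, hs3, hs4⟩ := step
    rw [heq]
    obtain ⟨r1, r2⟩ := ih hrest acc' hs1 hs2 hs3
    refine ⟨r1, fun y => ?_⟩
    rw [r2 y, hs4 y]
    simp only [List.mem_cons, exists_eq_or_imp]
    rw [or_assoc]

-- one positive's A-side exclusion condition IS the clamped interval
lemma cond_iff_interval (n md p y : Int) :
    (y = p ∨ (0 ≤ y ∧ 1 ≤ p - y ∧ p - y ≤ md) ∨ (y < n ∧ 1 ≤ y - p ∧ y - p ≤ md))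
      ↔ (pvLc md p ≤ y ∧ y ≤ pvHc n md p) := by
  unfold pvLc pvHc; omega

-- membership in a conditional-add fold over a Set
lemma mem_foldl_cond_add (l : List Int) (s : PySem.Set Int) (c : Int → Prop) [DecidablePred c] (f : Int → Int) (y : Int) :
    (y ∈ l.foldl (fun s i => if c i then PySem.Set.add s (f i) else s) s) ↔
      y ∈ s ∨ ∃ i ∈ l, c i ∧ y = f i := by
  induction l generalizing s with
  | nil => simp
  | cons a t ih =>
    simp only [List.foldl_cons, ih]
    by_cases h : c a
    · simp [h, PySem.Set.mem_add, List.mem_cons, exists_eq_or_imp, or_assoc]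
    · simp [h, List.mem_cons, exists_eq_or_imp]

-- membership in A's exclude set
lemma mem_exclude (positives : List Int) (n min_distance : Int) (y : Int) :
    (y ∈ positives.foldl (fun s pos =>
      let s := (PySem.List.pyRange 1 (min_distance + 1) 1).foldl
        (fun s i => if 0 ≤ pos - i then PySem.Set.add s (pos - i) else s) s
      (PySem.List.pyRange 1 (min_distance + 1) 1).foldl
        (fun s i => if pos + i < n then PySem.Set.add s (pos + i) else s) s)
      (PySem.Set.update PySem.Set.empty positives)) ↔
    ∃ p ∈ positives, y = p ∨ (0 ≤ y ∧ 1 ≤ p - y ∧ p - y ≤ min_distance)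
      ∨ (y < n ∧ 1 ≤ y - p ∧ y - p ≤ min_distance) := by
  have base : ∀ (s : PySem.Set Int) (l : List Int),
      (y ∈ l.foldl (fun s pos =>
        let s := (PySem.List.pyRange 1 (min_distance + 1) 1).foldl
          (fun s i => if 0 ≤ pos - i then PySem.Set.add s (pos - i) else s) s
        (PySem.List.pyRange 1 (min_distance + 1) 1).foldl
          (fun s i => if pos + i < n then PySem.Set.add s (pos + i) else s) s) s) ↔
      y ∈ s ∨ ∃ p ∈ l,
        (∃ i ∈ PySem.List.pyRange 1 (min_distance + 1) 1, 0 ≤ p - i ∧ y = p - i) ∨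
        (∃ i ∈ PySem.List.pyRange 1 (min_distance + 1) 1, p + i < n ∧ y = p + i) := by
    intro s l
    induction l generalizing s with
    | nil => simp
    | cons a t ih =>
      simp only [List.foldl_cons, ih, mem_foldl_cond_add]
      simp only [List.mem_cons, exists_eq_or_imp, or_assoc]
  rw [base]
  simp only [PySem.Set.update_empty, PySem.Set.mem_ofList, PySem.List.mem_pyRange_one]
  constructor
  · rintro (hy | ⟨p, hp, ⟨i, ⟨h1, h2⟩, h3, h4⟩ | ⟨i, ⟨h1, h2⟩, h3, h4⟩⟩)
    · exact ⟨y, hy, Or.inl rfl⟩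
    · exact ⟨p, hp, Or.inr (Or.inl (by omega))⟩
    · exact ⟨p, hp, Or.inr (Or.inr (by omega))⟩
  · rintro ⟨p, hp, h | h | h⟩
    · exact Or.inl (h ▸ hp)
    · exact Or.inr ⟨p, hp, Or.inl ⟨p - y, ⟨by omega, by omega⟩, by omega, by omega⟩⟩
    · exact Or.inr ⟨p, hp, Or.inr ⟨y - p, ⟨by omega, by omega⟩, by omega, by omega⟩⟩

-- fusing A's pool-building fold followed by its filter fold into B's single fold
lemma loop_fuse (l : List Int) (mid : Int) (P D : Int → Bool) :
    ∀ (pool res : List Int),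
      res = pool.foldl (fun fc c => if D c then fc ++ [c] else fc) [] →
      (l.foldl (fun (st : Int × List Int) idx =>
          if mid ≤ st.1 then st
          else if P idx then st
          else (st.1 + 1, if D idx then st.2 ++ [idx] else st.2))
        ((pool.length : Int), res)).2
      = (l.foldl (fun pool idx =>
          if mid ≤ (pool.length : Int) then pool
          else if P idx then pool
          else pool ++ [idx]) pool).foldl (fun fc c => if D c then fc ++ [c] else fc) [] := by
  induction l with
  | nil => intro pool res h; simpa using h
  | cons a t ih =>
    intro pool res h
    simp only [List.foldl_cons]
    by_cases h1 : mid ≤ (pool.length : Int)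
    · simp only [h1, if_pos]
      exact ih pool res h
    · simp only [h1, if_false]
      by_cases h2 : P a
      · simp only [h2, if_pos]
        exact ih pool res h
      · simp only [h2, Bool.false_eq_true, if_false]
        have hlen : ((pool ++ [a]).length : Int) = (pool.length : Int) + 1 := by
          simp only [List.length_append, List.length_singleton]; push_cast; ring
        rw [← hlen]
        apply ih (pool ++ [a])
        rw [List.foldl_append, ← h]
        simp

-- the Option-match on `min?` as an if-test
lemma Dmatch (min_distance : Int) (xs fc : List Int) (c : Int) :
    (match PySem.List.min? xs (fun x => x) with
      | some m => if min_distance < m then fc ++ [c] else fc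
      | none => fc)
    = (if (match PySem.List.min? xs (fun x => x) with
        | some m => decide (min_distance < m)
        | none => false) then fc ++ [c] else fc) := by
  cases PySem.List.min? xs (fun x => x) with
  | none => simp
  | some m => by_cases hm : min_distance < m <;> simp [hm]

-- Source B's binary-search distance equals the value of Python's min over the positives
lemma minDist_eq_min? (positives : List Int) (x : Int) (hne : positives ≠ []) :
    PySem.List.min? (positives.map (fun pos => |x - pos|)) (fun y => y)
      = some (pvMinDist (PySem.List.sorted positives (fun y => y) false) x) := by
  set ps := PySem.List.sorted positives (fun y => y) false with hps
  have hperm : ps.Perm positives := PySem.List.sorted_perm ..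
  have hs : ps.Pairwise (· ≤ ·) := by
    have := PySem.List.sorted_pairwise (xs := positives) (key := fun y => y)
    simpa using this
  have hpsne : ps ≠ [] := by
    intro h; rw [h] at hperm; exact hne (hperm.symm.eq_nil)
  obtain ⟨⟨p0, hp0, hval⟩, hmin⟩ := pvMinDist_spec ps x hs hpsne
  cases hm : PySem.List.min? (positives.map (fun pos => |x - pos|)) (fun y => y) with
  | none =>
    rw [PySem.List.min?_eq_none_iff] at hm
    simp only [List.map_eq_nil_iff] at hm
    exact absurd hm hne
  | some m =>
    have hmem := PySem.List.min?_mem hm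
    have hisMin := PySem.List.min?_isMin hm
    obtain ⟨p1, hp1, hm1⟩ := List.mem_map.mp hmem
    have h1 : pvMinDist ps x ≤ m := by
      rw [← hm1]
      exact hmin p1 (hperm.mem_iff.mpr hp1)
    have h2 : m ≤ pvMinDist ps x := by
      rw [hval]
      have : |x - p0| ∈ positives.map (fun pos => |x - pos|) :=
        List.mem_map.mpr ⟨p0, hperm.mem_iff.mp hp0, rfl⟩
      simpa using hisMin _ this
    rw [Option.some.injEq]
    omega

-- Source B's interval test equals membership in A's exclude set
lemma inIntervals_eq_contains (positives : List Int) (n md : Int) (idx : Int) :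
    pvInIntervals ((PySem.List.sorted positives (fun y => y) false).foldl (pvAddInterval n md) []) idx
      = PySem.Set.contains
        (positives.foldl (fun s pos =>
          let s := (PySem.List.pyRange 1 (md + 1) 1).foldl
            (fun s i => if 0 ≤ pos - i then PySem.Set.add s (pos - i) else s) s
          (PySem.List.pyRange 1 (md + 1) 1).foldl
            (fun s i => if pos + i < n then PySem.Set.add s (pos + i) else s) s)
          (PySem.Set.update PySem.Set.empty positives)) idx := by
  set ps := PySem.List.sorted positives (fun y => y) false with hps
  have hperm : ps.Perm positives := PySem.List.sorted_perm ..
  have hs : ps.Pairwise (· ≤ ·) := by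
    have := PySem.List.sorted_pairwise (xs := positives) (key := fun y => y)
    simpa using this
  obtain ⟨hsep, hunion⟩ := blocked_fold n md ps hs []
    ⟨by simp, List.Pairwise.nil⟩ (by simp) (by simp)
  rw [Bool.eq_iff_iff, pvInIntervals_spec _ _ hsep, PySem.Set.contains_iff, mem_exclude]
  rw [hunion idx]
  simp only [List.not_mem_nil, false_and, exists_false, false_or]
  constructor
  · rintro ⟨p, hp, h⟩
    exact ⟨p, hperm.mem_iff.mp hp, (cond_iff_interval n md p idx).mpr h⟩
  · rintro ⟨p, hp, h⟩
    exact ⟨p, hperm.mem_iff.mpr hp, (cond_iff_interval n md p idx).mp h⟩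

-- ===== VERDICT (by name: the statement is the Claim_ definition above) =====
theorem get_balanced_negatives_spec : Claim_equal_get_balanced_negatives := by
  intro order positives segments min_distance _ hpre
  unfold Spec_get_balanced_negatives get_balanced_negatives get_balanced_negatives_alt
  simp only []
  rcases eq_or_ne positives [] with rfl | hne
  · rcases hpre with h | h
    · exact absurd rfl h
    · subst h; rfl
  · set n : Int := (segments.length : Int) with hn
    set mid : Int := max 1 (PySem.Int.floordiv (order.length : Int) 2) with hmid
    set ps := PySem.List.sorted positives (fun y => y) false with hps
    set blocked := ps.foldl (pvAddInterval n min_distance) [] with hblocked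
    set D : Int → Bool := fun c => decide (min_distance < pvMinDist ps c) with hD
    have hAstep : (fun fc cand =>
        match PySem.List.min? (positives.map (fun pos => |cand - pos|)) (fun x => x) with
        | some m => if min_distance < m then fc ++ [cand] else fc
        | none => fc)
        = fun (fc : List Int) c => if D c then fc ++ [c] else fc := by
      funext fc c
      rw [Dmatch, minDist_eq_min? positives c hne]
    have hBstep : (fun (st : Int × List Int) idx =>
        if mid ≤ st.1 then st
        else if pvInIntervals blocked idx then st
        else (st.1 + 1, if min_distance < pvMinDist ps idx then st.2 ++ [idx] else st.2))
        = fun (st : Int × List Int) idx =>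
        if mid ≤ st.1 then st
        else if (PySem.Set.contains
          (positives.foldl (fun s pos =>
            let s := (PySem.List.pyRange 1 (min_distance + 1) 1).foldl
              (fun s i => if 0 ≤ pos - i then PySem.Set.add s (pos - i) else s) s
            (PySem.List.pyRange 1 (min_distance + 1) 1).foldl
              (fun s i => if pos + i < n then PySem.Set.add s (pos + i) else s) s)
            (PySem.Set.update PySem.Set.empty positives)) idx) then st
        else (st.1 + 1, if D idx then st.2 ++ [idx] else st.2) := by
      funext st idx
      rw [← inIntervals_eq_contains positives n min_distance idx, ← hps, ← hblocked, hD]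
      by_cases h1 : mid ≤ st.1
      · simp [h1]
      · simp only [h1, if_false]
        by_cases h2 : pvInIntervals blocked idx
        · simp [h2]
        · simp [h2]
    rw [hAstep, hBstep]
    have := loop_fuse order mid
      (fun idx => PySem.Set.contains
        (positives.foldl (fun s pos =>
          let s := (PySem.List.pyRange 1 (min_distance + 1) 1).foldl
            (fun s i => if 0 ≤ pos - i then PySem.Set.add s (pos - i) else s) s
          (PySem.List.pyRange 1 (min_distance + 1) 1).foldl
            (fun s i => if pos + i < n then PySem.Set.add s (pos + i) else s) s)
          (PySem.Set.update PySem.Set.empty positives)) idx)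
      D [] [] rfl
    simpa using this.symm
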